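-- pv_equiv track=rewrite | github.com/remcovanmook/networkd-schema | tools/ini2json.py | get_logical_lines
-- ===== SOURCE A (Python) =====
-- def get_logical_lines(content):
--     """
--     Generator that yields (type, content) tuples.
--     type is 'COMMENT' or 'LINE'.
--     Handles backslash line continuation and comment skipping inside continuation.
--     """
--     buffer = []
--     in_continuation = False
--
--     for line in content.splitlines():
--         stripped = line.strip()
--
--         # Determine if this line is a comment
--         is_comment = stripped.startswith('#') or stripped.startswith(';')
--
--         if is_comment:
--             if in_continuation:
--                 # Inside a continuation, comments are ignored completely (merged into the gap)
--                 continue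
--             else:
--                 yield ('COMMENT', line.strip()) # Preserve raw comment content (striped of whitespace around? maybe keep #)
--                 continue
--
--         if not stripped:
--             # Empty line
--             if in_continuation:
--                 continue
--             else:
--                 yield ('COMMENT', "") # Treat empty lines as comments to preserve spacing?
--                 # Or just ignore empty lines for now to simplify?
--                 # User asked to capture comments. Empty lines are style.
--                 # Let's ignore empty lines for structural matching, or maybe treat as comment ""?
--                 # Let's ignore empty lines to stay safer, unless requested.
--                 continue
--
--         # Check for continuation
--         if stripped.endswith('\\'):
--             # Append content without the backslash
--             segment = stripped[:-1].strip()
--             buffer.append(segment)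
--             in_continuation = True
--         else:
--             # End of logical line
--             buffer.append(stripped)
--             # Join with space as per spec ("backslash is replaced by a space character")
--             yield ('LINE', " ".join(buffer))
--             buffer = []
--             in_continuation = False
--
--     # Flush remaining if file ends with backslash (edge case)
--     if buffer:
--         yield ('LINE', " ".join(buffer))
-- ===== SOURCE B (Python) =====
-- def get_logical_lines(content):
--     """
--     Generator yielding (type, content) tuples, type 'COMMENT' or 'LINE'.
--     Nested-iterator decomposition: a shared iterator; continuations are
--     consumed by an inner loop instead of a flag-based state machine.
--     """
--     it = iter(content.splitlines())
--     for line in it: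
--         s = line.strip()
--         if s.startswith('#') or s.startswith(';'):
--             yield ('COMMENT', s)
--             continue
--         if not s:
--             yield ('COMMENT', '')
--             continue
--         if not s.endswith('\\'):
--             yield ('LINE', s)
--             continue
--         # Continuation: collect segments with the shared iterator.
--         buf = [s[:-1].strip()]
--         for line2 in it:
--             s2 = line2.strip()
--             if s2.startswith('#') or s2.startswith(';') or not s2:
--                 continue  # comments/blank lines inside a continuation are dropped
--             if s2.endswith('\\'):
--                 buf.append(s2[:-1].strip())
--             else:
--                 buf.append(s2)
--                 break
--         yield ('LINE', ' '.join(buf))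
-- ===== Notes on version B (the rewrite author's own statement) =====
-- stated objective: alternative
-- what changed: Replaces A's single flat loop carrying a buffer and an in_continuation flag with a shared explicit iterator: an outer loop handles comments, blanks and plain lines, and a nested inner loop consumes an entire backslash-continuation before yielding the joined logical line.
import Mathlib
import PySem

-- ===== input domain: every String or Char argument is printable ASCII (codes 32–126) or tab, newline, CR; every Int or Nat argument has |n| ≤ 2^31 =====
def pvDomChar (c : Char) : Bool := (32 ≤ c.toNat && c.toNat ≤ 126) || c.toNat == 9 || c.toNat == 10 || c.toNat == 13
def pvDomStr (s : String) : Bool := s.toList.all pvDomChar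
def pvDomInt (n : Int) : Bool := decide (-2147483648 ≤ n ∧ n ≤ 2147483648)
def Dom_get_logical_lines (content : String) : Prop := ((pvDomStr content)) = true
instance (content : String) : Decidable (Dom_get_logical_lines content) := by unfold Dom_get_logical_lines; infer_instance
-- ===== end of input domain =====

-- B replaces A's flag-based state machine with a shared iterator and a nested inner
-- loop that consumes a whole backslash-continuation; objective: alternative decomposition.

-- ===== PORT A =====
-- one fold step of A's flat loop; state = (buffer, in_continuation, yielded output)
def pvStepA (st : List String × Bool × List (String × String)) (line : String) :
    List String × Bool × List (String × String) :=
  let stripped := PySem.Str.strip line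
  let is_comment := PySem.Str.startswith stripped "#" || PySem.Str.startswith stripped ";"
  if is_comment then
    if st.2.1 then st else (st.1, st.2.1, st.2.2 ++ [("COMMENT", stripped)])
  else if stripped == "" then
    if st.2.1 then st else (st.1, st.2.1, st.2.2 ++ [("COMMENT", "")])
  else if PySem.Str.endswith stripped "\\" then
    (st.1 ++ [PySem.Str.strip (PySem.Str.slice stripped none (some (-1)))], true, st.2.2)
  else
    ([], false, st.2.2 ++ [("LINE", PySem.Str.join " " (st.1 ++ [stripped]))])

-- A's trailing 'if buffer: yield ...' flush
def pvFinishA (st : List String × Bool × List (String × String)) : List (String × String) :=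
  if st.1.isEmpty then st.2.2 else st.2.2 ++ [("LINE", PySem.Str.join " " st.1)]

def get_logical_lines (content : String) : List (String × String) :=
  pvFinishA ((PySem.Str.splitlines content).foldl pvStepA ([], false, []))

-- ===== PORT B =====
-- B's inner 'for line2 in it' loop: collects continuation segments, returns
-- (final buffer, lines left for the outer loop)
def pvInnerB (buf : List String) : List String → List String × List String
  | [] => (buf, [])
  | l :: rest =>
    let s := PySem.Str.strip l
    if PySem.Str.startswith s "#" || PySem.Str.startswith s ";" || s == "" then
      pvInnerB buf rest
    else if PySem.Str.endswith s "\\" then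
      pvInnerB (buf ++ [PySem.Str.strip (PySem.Str.slice s none (some (-1)))]) rest
    else
      (buf ++ [s], rest)

theorem pvInnerB_snd_le (buf : List String) (ls : List String) :
    (pvInnerB buf ls).2.length ≤ ls.length := by
  induction ls generalizing buf with
  | nil => simp [pvInnerB]
  | cons l rest ih =>
    simp only [pvInnerB]
    split
    · exact le_trans (ih buf) (by simp)
    · split
      · exact le_trans (ih _) (by simp)
      · simp

-- B's outer 'for line in it' loop
def pvOuterB : List String → List (String × String)
  | [] => []
  | l :: rest =>
    let s := PySem.Str.strip l
    if PySem.Str.startswith s "#" || PySem.Str.startswith s ";" then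
      ("COMMENT", s) :: pvOuterB rest
    else if s == "" then
      ("COMMENT", "") :: pvOuterB rest
    else if !(PySem.Str.endswith s "\\") then
      ("LINE", s) :: pvOuterB rest
    else
      let p := pvInnerB [PySem.Str.strip (PySem.Str.slice s none (some (-1)))] rest
      ("LINE", PySem.Str.join " " p.1) :: pvOuterB p.2
termination_by ls => ls.length
decreasing_by
  · simp
  · simp
  · simp
  · exact Nat.lt_succ_of_le (pvInnerB_snd_le _ rest)

def get_logical_lines_alt (content : String) : List (String × String) :=
  pvOuterB (PySem.Str.splitlines content)

-- ===== PRECONDITION & SPEC =====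
def Spec_get_logical_lines (content : String) (out : List (String × String)) : Prop := out = get_logical_lines_alt content
instance (content : String) (out : List (String × String)) : Decidable (Spec_get_logical_lines content out) := by unfold Spec_get_logical_lines; infer_instance

-- ===== CLAIM (what is proved, stated in full; the proofs are below) =====
def Claim_equal_get_logical_lines : Prop := ∀ (content : String), Dom_get_logical_lines content → Spec_get_logical_lines content (get_logical_lines content)

-- ===== LEMMAS AND PROOFS =====

-- " ".join([s]) == s
theorem pvJoin_singleton (s : String) : PySem.Str.join " " [s] = s := by
  simp [PySem.Str.join, PySem.Chars.join, List.intercalate]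

-- the main invariant: A's fold + flush equals B's nested loops, both from a clean
-- state and from mid-continuation state (buffer nonempty, flag set)
theorem pvMain (ls : List String) :
    (∀ out, pvFinishA (ls.foldl pvStepA ([], false, out)) = out ++ pvOuterB ls) ∧
    (∀ buf out, buf ≠ [] →
      pvFinishA (ls.foldl pvStepA (buf, true, out)) =
        out ++ ("LINE", PySem.Str.join " " (pvInnerB buf ls).1) :: pvOuterB (pvInnerB buf ls).2) := by
  induction ls with
  | nil =>
    constructor
    · intro out; simp [pvFinishA, pvOuterB]
    · intro buf out hbuf
      simp [pvFinishA, pvInnerB, pvOuterB, List.isEmpty_iff, hbuf]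
  | cons l rest ih =>
    constructor
    · intro out
      simp only [List.foldl_cons]
      rw [pvOuterB]
      by_cases h1 : (PySem.Str.startswith (PySem.Str.strip l) "#"
          || PySem.Str.startswith (PySem.Str.strip l) ";") = true
      · simp only [pvStepA, h1, if_true, if_false, Bool.false_eq_true]
        rw [ih.1]
        simp
      · by_cases h2 : (PySem.Str.strip l == "") = true
        · simp only [pvStepA, h1, h2, if_true, if_false, Bool.false_eq_true]
          rw [ih.1]
          simp
        · by_cases h3 : (PySem.Str.endswith (PySem.Str.strip l) "\\") = true
          · simp only [pvStepA, h1, h2, h3, if_true, if_false, Bool.false_eq_true]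
            rw [ih.2 _ out (by simp)]
            simp
          · simp only [pvStepA, h1, h2, h3, if_false, Bool.false_eq_true]
            rw [ih.1]
            simp [pvJoin_singleton]
    · intro buf out hbuf
      simp only [List.foldl_cons]
      rw [pvInnerB]
      by_cases h1 : (PySem.Str.startswith (PySem.Str.strip l) "#"
          || PySem.Str.startswith (PySem.Str.strip l) ";") = true
      · simp only [pvStepA, h1, if_true]
        rw [ih.2 _ out hbuf]
        simp
      · by_cases h2 : (PySem.Str.strip l == "") = true
        · simp only [pvStepA, h1, h2, if_true, if_false, Bool.false_eq_true]
          rw [ih.2 _ out hbuf]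
          simp
        · by_cases h3 : (PySem.Str.endswith (PySem.Str.strip l) "\\") = true
          · simp only [pvStepA, h1, h2, h3, if_true, if_false, Bool.false_eq_true]
            rw [ih.2 _ out (by simp)]
            simp
          · simp only [pvStepA, h1, h2, h3, if_true, if_false, Bool.false_eq_true]
            rw [ih.1]
            simp

-- ===== VERDICT (by name: the statement is the Claim_ definition above) =====
theorem get_logical_lines_spec : Claim_equal_get_logical_lines := by
  intro content _
  unfold Spec_get_logical_lines get_logical_lines get_logical_lines_alt
  simpa using (pvMain (PySem.Str.splitlines content)).1 []
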